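-- pv_equiv track=rewrite | github.com/miliar/Code_Jam_Webscraper | solutions_python/Problem_203/459.py | compute
-- ===== SOURCE A (Python) =====
-- def compute(grid, R):
--     g = grid
--     for row in g:
--         now = '?'
--         for i, char in enumerate(row):
--             if char != '?':
--                 now = char
--                 for x in range(1, i+1):
--                     if row[i-x] == '?':
--                         row[i-x] = now
--                     else:
--                         break
--             else:
--                 row[i] = now
--     for i, row in enumerate(g):
--         if row != list('?' * len(row)):
--             good_row = row
--             break
--
--     for i, row in enumerate(g):
--         if row == list('?' * len(row)):
--             g[i] = good_row
--         else:
--             good_row = row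
--
--     return g
-- ===== SOURCE B (Python) =====
-- # B: phase 1 rewritten as two linear passes per row (forward carry, then a
-- # backward pass that fills the remaining leading '?'s); phase 2 (replacing
-- # all-'?' rows by the last good row) kept as in A.  Mutates grid in place
-- # like A does; equivalence is about the returned value.
-- def compute(grid, R):
--     for row in grid:
--         last = '?'
--         for i in range(len(row)):
--             if row[i] != '?':
--                 last = row[i]
--             elif last != '?':
--                 row[i] = last
--         first = '?'
--         for i in range(len(row) - 1, -1, -1):
--             if row[i] != '?':
--                 first = row[i]
--             elif first != '?':
--                 row[i] = first
--     for i, row in enumerate(grid):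
--         if row != list('?' * len(row)):
--             good_row = row
--             break
--     for i, row in enumerate(grid):
--         if row == list('?' * len(row)):
--             grid[i] = good_row
--         else:
--             good_row = row
--     return grid
-- ===== Notes on version B (the rewrite author's own statement) =====
-- stated objective: simpler
-- what changed: Phase 1 is rewritten as two plain linear passes per row (a forward pass carrying the last known cell, then a backward pass filling the remaining leading '?'s) instead of A's forward scan with an inner right-to-left backfill loop triggered at each known cell; phase 2 (all-'?' row replacement) is kept, preserving A's UnboundLocalError on a non-empty all-'?' grid, which Pre_ excludes.
import Mathlib
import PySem

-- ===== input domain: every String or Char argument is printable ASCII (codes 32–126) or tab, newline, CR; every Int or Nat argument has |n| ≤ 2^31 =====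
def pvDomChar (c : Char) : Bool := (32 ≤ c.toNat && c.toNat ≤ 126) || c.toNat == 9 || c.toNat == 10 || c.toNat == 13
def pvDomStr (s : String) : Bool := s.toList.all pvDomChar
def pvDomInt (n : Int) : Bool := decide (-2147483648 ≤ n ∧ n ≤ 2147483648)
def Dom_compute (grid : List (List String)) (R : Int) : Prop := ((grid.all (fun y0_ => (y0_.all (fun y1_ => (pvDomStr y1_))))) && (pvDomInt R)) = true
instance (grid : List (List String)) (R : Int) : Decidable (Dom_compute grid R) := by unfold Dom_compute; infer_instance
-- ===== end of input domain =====

-- B rewrites phase 1 as two linear passes per row; phase 2 is kept (so both raise on a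
-- non-empty all-'?' grid, excluded by Pre_). Both Pythons mutate grid in place; the
-- equivalence proved here is about the returned value.

-- ===== PORT A =====
-- inner 'for x in range(1, i+1): … break' backfill loop of A
def backA (now : String) (i : Nat) : List Nat → List String → List String
  | [], r => r
  | x :: xs, r => if r.getD (i - x) "" = "?" then backA now i xs (r.set (i - x) now) else r

-- body of A's 'for i, char in enumerate(row)' loop; state = (row being mutated, now)
def stepA (st : List String × String) (p : String × Nat) : List String × String :=
  if p.1 ≠ "?" then (backA p.1 p.2 (List.range' 1 p.2) st.1, p.1)
  else (st.1.set p.2 st.2, st.2)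

def p1A (row : List String) : List String := (row.zipIdx.foldl stepA (row, "?")).1

-- body of A's second 'for i, row in enumerate(g)' loop; state = (rows so far, good_row)
def step2A (st : List (List String) × List String) (row : List String) : List (List String) × List String :=
  if row == List.replicate row.length "?" then (st.1 ++ [st.2], st.2) else (st.1 ++ [row], row)

def compute (grid : List (List String)) (R : Int) : List (List String) :=
  let g := grid.map p1A
  let good := (g.find? (fun row => !(row == List.replicate row.length "?"))).getD []
  (g.foldl step2A ([], good)).1

-- ===== PORT B =====
-- forward pass: carry the last seen non-'?' cell
def fstep (st : List String × String) (c : String) : List String × String :=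
  if c ≠ "?" then (st.1 ++ [c], c)
  else if st.2 ≠ "?" then (st.1 ++ [st.2], st.2)
  else (st.1 ++ [c], st.2)

def fwdB (row : List String) : List String := (row.foldl fstep ([], "?")).1

-- backward pass (Python's range(len-1, -1, -1) loop): carry the first non-'?' cell
def bstep (c : String) (st : String × List String) : String × List String :=
  if c ≠ "?" then (c, c :: st.2)
  else if st.1 ≠ "?" then (st.1, st.1 :: st.2)
  else (st.1, c :: st.2)

def bwdB (row : List String) : List String := (row.foldr bstep ("?", [])).2

-- phase 2, kept as in B's Python: replace all-'?' rows by the last good row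
def fillB (good : List String) : List (List String) → List (List String)
  | [] => []
  | row :: rest =>
      if row == List.replicate row.length "?" then good :: fillB good rest
      else row :: fillB row rest

def compute_alt (grid : List (List String)) (R : Int) : List (List String) :=
  let g := grid.map (fun row => bwdB (fwdB row))
  fillB ((g.find? (fun row => !(row == List.replicate row.length "?"))).getD []) g

-- ===== PRECONDITION & SPEC =====
-- Pre_ excludes exactly the non-empty grids whose cells are all '?': there Python A
-- (and B alike) hits UnboundLocalError on good_row.
def Pre_compute (grid : List (List String)) (R : Int) : Prop :=
  grid = [] ∨ ∃ row ∈ grid, ∃ c ∈ row, c ≠ "?"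
instance (grid : List (List String)) (R : Int) : Decidable (Pre_compute grid R) := by
  unfold Pre_compute; infer_instance

def pvWitness_compute : List (List String) × Int := ([["a", "?"], ["?", "?"]], 0)

def Spec_compute (grid : List (List String)) (R : Int) (out : List (List String)) : Prop := out = compute_alt grid R
instance (grid : List (List String)) (R : Int) (out : List (List String)) : Decidable (Spec_compute grid R out) := by unfold Spec_compute; infer_instance

-- ===== CLAIM (what is proved, stated in full; the proofs are below) =====
def Claim_equal_compute : Prop := ∀ (grid : List (List String)) (R : Int), Dom_compute grid R → Pre_compute grid R → Spec_compute grid R (compute grid R)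

-- ===== LEMMAS AND PROOFS =====

-- reasoning views of the two B passes
def lastGo (l : String) : List String → String
  | [] => l
  | c :: cs => lastGo (if c ≠ "?" then c else l) cs

def fwdGo (l : String) : List String → List String
  | [] => []
  | c :: cs => (if c ≠ "?" then c else if l ≠ "?" then l else c) :: fwdGo (if c ≠ "?" then c else l) cs

def gB (f0 : String) : List String → String
  | [] => f0
  | c :: cs => if c ≠ "?" then c else gB f0 cs

def hB (f0 : String) : List String → List String
  | [] => []
  | c :: cs => (if c ≠ "?" then c else if gB f0 cs ≠ "?" then gB f0 cs else c) :: hB f0 cs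

def p1B (row : List String) : List String := bwdB (fwdB row)

def allQ (xs : List String) : Prop := ∀ c ∈ xs, c = "?"

theorem fwd_fold (xs : List String) : ∀ (acc : List String) (l : String),
    xs.foldl fstep (acc, l) = (acc ++ fwdGo l xs, lastGo l xs) := by
  induction xs with
  | nil => intro acc l; simp [fwdGo, lastGo]
  | cons c cs ih =>
    intro acc l
    by_cases hc : c = "?" <;> by_cases hl : l = "?" <;>
      simp [fstep, fwdGo, lastGo, hc, hl, ih]

theorem bwd_fold (xs : List String) (f0 : String) (t0 : List String) :
    xs.foldr bstep (f0, t0) = (gB f0 xs, hB f0 xs ++ t0) := by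
  induction xs with
  | nil => simp [gB, hB]
  | cons c cs ih =>
    by_cases hc : c = "?" <;> by_cases hg : gB f0 cs = "?" <;>
      simp [bstep, gB, hB, hc, hg, ih]

theorem p1B_eq (row : List String) : p1B row = hB "?" (fwdGo "?" row) := by
  simp [p1B, fwdB, bwdB, fwd_fold, bwd_fold]

theorem lastGo_ne_of_carry (xs : List String) : ∀ l, l ≠ "?" → lastGo l xs ≠ "?" := by
  induction xs with
  | nil => intro l hl; simpa [lastGo] using hl
  | cons c cs ih =>
    intro l hl
    by_cases hc : c = "?" <;> simp [lastGo, hc] <;> [exact ih l hl; exact ih c hc]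

theorem lastGo_ne (xs : List String) (h : ¬ allQ xs) (l : String) : lastGo l xs ≠ "?" := by
  induction xs generalizing l with
  | nil => exact absurd (fun c hc => by simp at hc) h
  | cons c cs ih =>
    by_cases hc : c = "?"
    · have hcs : ¬ allQ cs := by
        intro hall
        apply h
        intro d hd
        rcases List.mem_cons.1 hd with h1 | h1
        · rw [h1, hc]
        · exact hall d h1
      simpa [lastGo, hc] using ih hcs l
    · simpa [lastGo, hc] using lastGo_ne_of_carry cs c hc

theorem lastGo_allQ (xs : List String) (h : allQ xs) : lastGo "?" xs = "?" := by
  induction xs with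
  | nil => rfl
  | cons c cs ih =>
    have hc : c = "?" := h c (by simp)
    have hcs : allQ cs := fun d hd => h d (by simp [hd])
    simp [lastGo, hc, ih hcs]

theorem fwdGo_allQ (xs : List String) (h : allQ xs) : fwdGo "?" xs = xs := by
  induction xs with
  | nil => rfl
  | cons c cs ih =>
    have hc : c = "?" := h c (by simp)
    have hcs : allQ cs := fun d hd => h d (by simp [hd])
    simp [fwdGo, hc, ih hcs]

theorem gB_allQ (xs : List String) (h : allQ xs) : gB "?" xs = "?" := by
  induction xs with
  | nil => rfl
  | cons c cs ih =>
    have hc : c = "?" := h c (by simp)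
    have hcs : allQ cs := fun d hd => h d (by simp [hd])
    simp [gB, hc, ih hcs]

theorem hB_allQ (xs : List String) (h : allQ xs) : hB "?" xs = xs := by
  induction xs with
  | nil => rfl
  | cons c cs ih =>
    have hc : c = "?" := h c (by simp)
    have hcs : allQ cs := fun d hd => h d (by simp [hd])
    simp [hB, hc, gB_allQ cs hcs, ih hcs]

theorem lastGo_snoc (xs : List String) (l c : String) :
    lastGo l (xs ++ [c]) = if c ≠ "?" then c else lastGo l xs := by
  induction xs generalizing l with
  | nil => simp [lastGo]
  | cons d ds ih => simp [lastGo, ih]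

theorem fwdGo_snoc (xs : List String) (l c : String) :
    fwdGo l (xs ++ [c]) = fwdGo l xs ++ [if c ≠ "?" then c else if lastGo l xs ≠ "?" then lastGo l xs else c] := by
  induction xs generalizing l with
  | nil => simp [fwdGo, lastGo]
  | cons d ds ih => simp [fwdGo, lastGo, ih]

theorem gB_snoc (cs : List String) (f0 v : String) :
    gB f0 (cs ++ [v]) = gB (if v ≠ "?" then v else f0) cs := by
  induction cs with
  | nil => simp [gB]
  | cons d ds ih => simp [gB, ih]

theorem hB_snoc (ys : List String) (f0 v : String) :
    hB f0 (ys ++ [v]) = hB (if v ≠ "?" then v else f0) ys ++ [if v ≠ "?" then v else if f0 ≠ "?" then f0 else v] := by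
  induction ys with
  | nil => simp [hB, gB]
  | cons d ds ih => simp [hB, gB_snoc, ih]

theorem gB_irrel (ys : List String) (h : ∃ c ∈ ys, c ≠ "?") (f0 f1 : String) : gB f0 ys = gB f1 ys := by
  induction ys with
  | nil => simp at h
  | cons c cs ih =>
    by_cases hc : c = "?"
    · obtain ⟨d, hd, hdq⟩ := h
      rcases List.mem_cons.1 hd with h1 | h1
      · exact absurd (h1 ▸ hc) hdq
      · simp [gB, hc, ih ⟨d, h1, hdq⟩]
    · simp [gB, hc]

theorem hB_irrel (ys : List String) (h : ys.getLast? ≠ some "?") (f0 f1 : String) : hB f0 ys = hB f1 ys := by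
  induction ys with
  | nil => rfl
  | cons c cs ih =>
    cases cs with
    | nil =>
      have hc : c ≠ "?" := by simpa using h
      simp [hB, hc]
    | cons d ds =>
      have h' : (d :: ds).getLast? ≠ some "?" := by
        simpa [List.getLast?_cons_cons] using h
      have hlast : (d :: ds).getLast? = some ((d :: ds).getLast (by simp)) :=
        List.getLast?_eq_some_getLast (by simp)
      have hwit : ∃ e ∈ (d :: ds), e ≠ "?" := by
        refine ⟨(d :: ds).getLast (by simp), List.getLast_mem _, ?_⟩
        intro he; exact h' (by rw [hlast, he])
      have hg : gB f0 (d :: ds) = gB f1 (d :: ds) := gB_irrel (d :: ds) hwit f0 f1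
      calc hB f0 (c :: d :: ds)
          = (if c ≠ "?" then c else if gB f0 (d :: ds) ≠ "?" then gB f0 (d :: ds) else c)
              :: hB f0 (d :: ds) := rfl
        _ = (if c ≠ "?" then c else if gB f1 (d :: ds) ≠ "?" then gB f1 (d :: ds) else c)
              :: hB f1 (d :: ds) := by rw [hg, ih h']
        _ = hB f1 (c :: d :: ds) := rfl

theorem fwdGo_getLast (xs : List String) (h : xs ≠ []) (l : String) :
    (fwdGo l xs).getLast? = some (lastGo l xs) := by
  induction xs using List.reverseRecOn with
  | nil => exact absurd rfl h
  | append_singleton ys c ih =>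
    rw [fwdGo_snoc, lastGo_snoc, List.getLast?_concat]
    split_ifs with h1 h2 <;> simp_all

theorem fwdGo_length (xs : List String) : ∀ l, (fwdGo l xs).length = xs.length := by
  induction xs with
  | nil => intro l; rfl
  | cons c cs ih => intro l; simp [fwdGo, ih]

theorem hB_length (ys : List String) (f0 : String) : (hB f0 ys).length = ys.length := by
  induction ys with
  | nil => rfl
  | cons c cs ih => simp [hB, ih]

theorem gB_replicate (n : Nat) (f0 : String) : gB f0 (List.replicate n "?") = f0 := by
  induction n with
  | zero => rfl
  | succ m ih => simp [List.replicate_succ, gB, ih]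

theorem hB_replicate (n : Nat) (c : String) (hc : c ≠ "?") :
    hB c (List.replicate n "?") = List.replicate n c := by
  induction n with
  | zero => rfl
  | succ m ih => simp [List.replicate_succ, hB, gB_replicate, hc, ih]

theorem p1B_length (xs : List String) : (p1B xs).length = xs.length := by
  rw [p1B_eq, hB_length, fwdGo_length]

theorem p1B_allQ (xs : List String) (h : allQ xs) : p1B xs = xs := by
  rw [p1B_eq, fwdGo_allQ xs h, hB_allQ xs h]

theorem p1B_getLast (xs : List String) (h : ¬ allQ xs) :
    (p1B xs).getLast? = some (lastGo "?" xs) := by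
  induction xs using List.reverseRecOn with
  | nil => exact absurd (fun c hc => by simp at hc) h
  | append_singleton zs c _ =>
    rw [p1B_eq, fwdGo_snoc, hB_snoc, List.getLast?_concat, lastGo_snoc]
    by_cases hc : c = "?"
    · by_cases hz : lastGo "?" zs = "?"
      · exfalso
        have hzq : allQ zs := by
          by_contra hq; exact lastGo_ne zs hq "?" hz
        apply h
        intro d hd
        rcases List.mem_append.1 hd with h1 | h1
        · exact hzq d h1
        · simpa [hc] using List.mem_singleton.1 h1
      · simp [hc, hz]
    · simp [hc]

theorem p1B_snoc_known_allQ (xs : List String) (h : allQ xs) (c : String) (hc : c ≠ "?") :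
    p1B (xs ++ [c]) = List.replicate xs.length c ++ [c] := by
  have hrep : xs = List.replicate xs.length "?" := List.eq_replicate_of_mem h
  rw [p1B_eq, fwdGo_snoc, fwdGo_allQ xs h]
  simp only [if_pos hc]
  rw [hB_snoc]
  simp only [if_pos hc]
  conv_lhs => rw [hrep]
  rw [hB_replicate xs.length c hc]

theorem p1B_snoc_known (xs : List String) (h : ¬ allQ xs) (c : String) (hc : c ≠ "?") :
    p1B (xs ++ [c]) = p1B xs ++ [c] := by
  have hne : xs ≠ [] := by rintro rfl; exact h (fun d hd => by simp at hd)
  have hl : (fwdGo "?" xs).getLast? ≠ some "?" := by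
    rw [fwdGo_getLast xs hne]
    simpa using lastGo_ne xs h "?"
  rw [p1B_eq, fwdGo_snoc]
  simp only [if_pos hc]
  rw [hB_snoc]
  simp only [if_pos hc]
  rw [hB_irrel (fwdGo "?" xs) hl c "?", p1B_eq]

theorem p1B_snoc_q (xs : List String) (h : ¬ allQ xs) :
    p1B (xs ++ ["?"]) = p1B xs ++ [lastGo "?" xs] := by
  have hne : xs ≠ [] := by rintro rfl; exact h (fun d hd => by simp at hd)
  have hv : lastGo "?" xs ≠ "?" := lastGo_ne xs h "?"
  have hl : (fwdGo "?" xs).getLast? ≠ some "?" := by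
    rw [fwdGo_getLast xs hne]; simpa using hv
  rw [p1B_eq, fwdGo_snoc]
  rw [if_neg (by simp), if_pos hv]
  rw [hB_snoc]
  rw [if_pos hv, if_pos hv]
  rw [hB_irrel (fwdGo "?" xs) hl (lastGo "?" xs) "?", p1B_eq]

theorem set_append_len (l1 l2 : List String) (a v : String) (n : Nat) (hn : n = l1.length) :
    (l1 ++ a :: l2).set n v = l1 ++ v :: l2 := by
  subst hn
  induction l1 with
  | nil => rfl
  | cons c cs ih => simp [ih]

theorem backA_fill (c : String) (rest' : List String) (n : Nat) :
    ∀ (k j : Nat), j + k = n →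
      backA c n (List.range' (j+1) k) (List.replicate k "?" ++ List.replicate j c ++ c :: rest')
        = List.replicate k c ++ List.replicate j c ++ c :: rest' := by
  intro k
  induction k with
  | zero => intro j hj; simp [backA]
  | succ m ih =>
    intro j hj
    rw [List.range'_succ, backA]
    have hidx : n - (j+1) = m := by omega
    have hget : ((List.replicate (m+1) "?" ++ List.replicate j c ++ c :: rest').getD m "") = "?" := by
      rw [List.getD_eq_getElem?_getD, List.append_assoc, List.getElem?_append_left (by simp)]
      simp
    rw [hidx, if_pos hget]
    have e1 : List.replicate (m+1) "?" ++ List.replicate j c ++ c :: rest'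
        = List.replicate m "?" ++ "?" :: (List.replicate j c ++ c :: rest') := by
      rw [List.replicate_succ']
      simp [List.append_assoc]
    have hset : (List.replicate (m+1) "?" ++ List.replicate j c ++ c :: rest').set m c
        = List.replicate m "?" ++ List.replicate (j+1) c ++ c :: rest' := by
      rw [e1, set_append_len _ _ _ _ m (by simp)]
      simp [List.replicate_succ, List.append_assoc]
    rw [hset, ih (j+1) (by omega)]
    have hmerge : ∀ (p q : Nat),
        List.replicate p c ++ List.replicate q c ++ c :: rest'
          = List.replicate (p+q) c ++ c :: rest' := by
      intro p q
      rw [← List.replicate_add]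
    rw [hmerge, hmerge, show m + (j+1) = m+1+j by omega]

theorem loopA (rest : List String) : ∀ (pre : List String),
    (((rest.zipIdx pre.length).foldl stepA (p1B pre ++ rest, lastGo "?" pre))).1
      = p1B (pre ++ rest) := by
  induction rest with
  | nil => intro pre; simp
  | cons c rest' ih =>
    intro pre
    rw [List.zipIdx_cons, List.foldl_cons]
    by_cases hc : c = "?"
    · subst hc
      have hstep : stepA (p1B pre ++ "?" :: rest', lastGo "?" pre) ("?", pre.length)
          = (p1B pre ++ lastGo "?" pre :: rest', lastGo "?" pre) := by
        simp only [stepA]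
        rw [if_neg (by simp)]
        rw [set_append_len (p1B pre) rest' "?" (lastGo "?" pre) pre.length (by rw [p1B_length])]
      rw [hstep]
      by_cases hq : allQ pre
      · have hq' : allQ (pre ++ ["?"]) := by
          intro d hd
          rcases List.mem_append.1 hd with h1 | h1
          · exact hq d h1
          · simpa using List.mem_singleton.1 h1
        have h1 : p1B pre ++ lastGo "?" pre :: rest' = p1B (pre ++ ["?"]) ++ rest' := by
          rw [p1B_allQ pre hq, p1B_allQ _ hq', lastGo_allQ pre hq]
          simp
        have h2 : lastGo "?" pre = lastGo "?" (pre ++ ["?"]) := by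
          rw [lastGo_allQ pre hq, lastGo_allQ _ hq']
        have h3 : (pre ++ ["?"]).length = pre.length + 1 := by simp
        have hIH := ih (pre ++ ["?"])
        rw [h3, ← h2, ← h1] at hIH
        rw [hIH]
        simp
      · have h1 : p1B pre ++ lastGo "?" pre :: rest' = p1B (pre ++ ["?"]) ++ rest' := by
          rw [p1B_snoc_q pre hq]; simp
        have h2 : lastGo "?" pre = lastGo "?" (pre ++ ["?"]) := by
          rw [lastGo_snoc]; simp
        have h3 : (pre ++ ["?"]).length = pre.length + 1 := by simp
        have hIH := ih (pre ++ ["?"])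
        rw [h3, ← h2, ← h1] at hIH
        rw [hIH]
        simp
    · have hstep : stepA (p1B pre ++ c :: rest', lastGo "?" pre) (c, pre.length)
          = (backA c pre.length (List.range' 1 pre.length) (p1B pre ++ c :: rest'), c) := by
        simp [stepA, hc]
      rw [hstep]
      by_cases hq : allQ pre
      · have hrep : pre = List.replicate pre.length "?" := List.eq_replicate_of_mem hq
        have hfill : backA c pre.length (List.range' 1 pre.length) (p1B pre ++ c :: rest')
            = List.replicate pre.length c ++ c :: rest' := by
          rw [p1B_allQ pre hq]
          conv_lhs => rw [hrep]
          have := backA_fill c rest' pre.length pre.length 0 (by omega)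
          simpa using this
        have h1 : List.replicate pre.length c ++ c :: rest' = p1B (pre ++ [c]) ++ rest' := by
          rw [p1B_snoc_known_allQ pre hq c hc]; simp
        have h2 : c = lastGo "?" (pre ++ [c]) := by rw [lastGo_snoc]; simp [hc]
        have h3 : (pre ++ [c]).length = pre.length + 1 := by simp
        have hIH := ih (pre ++ [c])
        rw [h3, ← h2, ← h1] at hIH
        rw [hfill, hIH]
        simp
      · have hne : pre ≠ [] := by rintro rfl; exact hq (fun d hd => by simp at hd)
        have hpos : 0 < pre.length := List.length_pos_iff.2 hne
        have hlast : (p1B pre ++ c :: rest').getD (pre.length - 1) "" = lastGo "?" pre := by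
          rw [List.getD_eq_getElem?_getD,
              List.getElem?_append_left (by rw [p1B_length]; omega)]
          have hgl := p1B_getLast pre hq
          rw [List.getLast?_eq_getElem?, p1B_length] at hgl
          rw [hgl]
          rfl
        have hback : backA c pre.length (List.range' 1 pre.length) (p1B pre ++ c :: rest')
            = p1B pre ++ c :: rest' := by
          obtain ⟨m, hm⟩ : ∃ m, pre.length = m + 1 := ⟨pre.length - 1, by omega⟩
          rw [hm, List.range'_succ, backA]
          rw [show m + 1 - 1 = m by omega, show m = pre.length - 1 by omega, hlast]
          rw [if_neg (lastGo_ne pre hq "?")]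
        have h1 : p1B pre ++ c :: rest' = p1B (pre ++ [c]) ++ rest' := by
          rw [p1B_snoc_known pre hq c hc]; simp
        have h2 : c = lastGo "?" (pre ++ [c]) := by rw [lastGo_snoc]; simp [hc]
        have h3 : (pre ++ [c]).length = pre.length + 1 := by simp
        have hIH := ih (pre ++ [c])
        rw [h3, ← h2, ← h1] at hIH
        rw [hback, hIH]
        simp

theorem p1A_eq_p1B (row : List String) : p1A row = p1B row := by
  have := loopA row []
  simpa [p1A, p1B, fwdB, bwdB, lastGo] using this

theorem fold2_eq_fillB (g : List (List String)) : ∀ (acc : List (List String)) (good : List String),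
    (g.foldl step2A (acc, good)).1 = acc ++ fillB good g := by
  induction g with
  | nil => intro acc good; simp [fillB]
  | cons row rest ih =>
    intro acc good
    cases h : (row == List.replicate row.length "?") <;>
      simp [step2A, fillB, h, ih]

-- ===== VERDICT (by name: the statement is the Claim_ definition above) =====
theorem compute_spec : Claim_equal_compute := by
  intro grid R _dom _pre
  unfold Spec_compute compute compute_alt
  have hfun : p1A = fun row => bwdB (fwdB row) := funext fun r => p1A_eq_p1B r
  rw [hfun, fold2_eq_fillB]
  simp
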